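-- pv_equiv track=rewrite | github.com/davisonrails/Python_scripting_misc | to_unicode.py | raisedpos_to_binary
-- ===== SOURCE A (Python) =====
-- def raisedpos_to_binary(s):
--     ''' (str) -> str
--     Convert a string representing a braille character in raised-position
--     representation  into the binary representation.
--     TODO: For students to complete.
--
--     >>> raisedpos_to_binary('')
--     '00000000'
--     >>> raisedpos_to_binary('142536')
--     '11111100'
--     >>> raisedpos_to_binary('14253678')
--     '11111111'
--     >>> raisedpos_to_binary('123')
--     '11100000'
--     >>> raisedpos_to_binary('125')
--     '11001000'
--     '''
--     counter = 1
--     sequence = ''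
--
--     while counter < 9:
--         if s.find(str(counter)) != -1:
--             sequence += '1'
--             counter += 1
--         else:
--             sequence += '0'
--             counter += 1
--     return sequence
-- ===== SOURCE B (Python) =====
-- def raisedpos_to_binary(s):
--     """Single pass: scatter each raised position directly into an 8-slot result."""
--     result = ['0'] * 8
--     for c in s:
--         if c in '12345678':
--             result[int(c) - 1] = '1'
--     return ''.join(result)
-- ===== Notes on version B (the rewrite author's own statement) =====
-- stated objective: alternative
-- what changed: B makes a single pass over the input scattering marks into a preallocated 8-slot buffer, instead of A's eight whole-string substring searches (one s.find per position); in CPython A's C-level find is not beaten, so no speed is claimed.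
import Mathlib
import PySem

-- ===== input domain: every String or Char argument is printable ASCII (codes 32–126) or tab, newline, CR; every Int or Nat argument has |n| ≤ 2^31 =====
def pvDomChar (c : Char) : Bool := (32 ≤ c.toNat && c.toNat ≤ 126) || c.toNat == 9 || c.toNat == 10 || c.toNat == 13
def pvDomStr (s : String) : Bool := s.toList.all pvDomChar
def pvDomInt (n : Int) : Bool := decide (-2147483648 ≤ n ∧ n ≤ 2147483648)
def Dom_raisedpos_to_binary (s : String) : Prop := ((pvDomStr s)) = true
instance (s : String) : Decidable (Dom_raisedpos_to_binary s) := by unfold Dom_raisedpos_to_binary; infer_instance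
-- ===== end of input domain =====

-- B is an alternative decomposition: a single pass over s scattering marks into a preallocated
-- 8-slot buffer, instead of A's eight whole-string scans (one s.find per position).

-- ===== PORT A =====
-- while counter < 9: append '1'/'0' according to s.find(str(counter)); ported as a fold over range(1, 9)
def raisedpos_to_binary (s : String) : String :=
  (PySem.List.pyRange 1 9 1).foldl
    (fun sequence counter =>
      if PySem.Str.find s (PySem.Int.toStr counter) ≠ -1 then sequence ++ "1" else sequence ++ "0")
    ""

-- ===== PORT B =====
-- for c in s: if c in '12345678': result[int(c)-1] = '1'; return ''.join(result).
-- 'c in "12345678"' (a one-character needle) is ported as membership of c in the digit characters,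
-- and int(c) - 1 as c.toNat - 49 (exact, since the guard ensures c is one of '1'..'8').
def raisedpos_to_binary_alt (s : String) : String :=
  String.mk
    (s.toList.foldl
      (fun result c =>
        if c ∈ ['1', '2', '3', '4', '5', '6', '7', '8'] then result.set (c.toNat - 49) '1' else result)
      ['0', '0', '0', '0', '0', '0', '0', '0'])

-- ===== PRECONDITION & SPEC =====
def Spec_raisedpos_to_binary (s : String) (out : String) : Prop := out = raisedpos_to_binary_alt s
instance (s : String) (out : String) : Decidable (Spec_raisedpos_to_binary s out) := by unfold Spec_raisedpos_to_binary; infer_instance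

-- ===== CLAIM (what is proved, stated in full; the proofs are below) =====
def Claim_equal_raisedpos_to_binary : Prop := ∀ (s : String), Dom_raisedpos_to_binary s → Spec_raisedpos_to_binary s (raisedpos_to_binary s)

-- ===== LEMMAS AND PROOFS =====

-- B's marking fold, fully characterised on an explicit 8-slot buffer.
theorem fold_mark (l : List Char) (a₁ a₂ a₃ a₄ a₅ a₆ a₇ a₈ : Char) :
    l.foldl
      (fun result c =>
        if c ∈ ['1', '2', '3', '4', '5', '6', '7', '8'] then result.set (c.toNat - 49) '1' else result)
      [a₁, a₂, a₃, a₄, a₅, a₆, a₇, a₈] =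
    [if '1' ∈ l then '1' else a₁, if '2' ∈ l then '1' else a₂,
     if '3' ∈ l then '1' else a₃, if '4' ∈ l then '1' else a₄,
     if '5' ∈ l then '1' else a₅, if '6' ∈ l then '1' else a₆,
     if '7' ∈ l then '1' else a₇, if '8' ∈ l then '1' else a₈] := by
  induction l generalizing a₁ a₂ a₃ a₄ a₅ a₆ a₇ a₈ with
  | nil => simp
  | cons c rest ih =>
    by_cases hc : c ∈ ['1', '2', '3', '4', '5', '6', '7', '8']
    · simp only [List.foldl_cons, if_pos hc]
      fin_cases hc <;>
        · simp only [List.set, Char.reduceToNat]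
          norm_num [List.set]
          simp only [List.mem_cons, List.not_mem_nil, or_false] at ih
          rw [ih]
          simp
    · simp only [List.foldl_cons, if_neg hc, ih]
      simp only [List.mem_cons, List.not_mem_nil, or_false, not_or] at hc
      obtain ⟨h1, h2, h3, h4, h5, h6, h7, h8⟩ := hc
      simp [List.mem_cons, Ne.symm h1, Ne.symm h2, Ne.symm h3, Ne.symm h4,
        Ne.symm h5, Ne.symm h6, Ne.symm h7, Ne.symm h8]

-- s.find(t), for a one-character needle t, succeeds exactly when that character occurs in s.
theorem find_single_ne_neg_one (s : String) (t : String) (c : Char) (ht : t.toList = [c]) :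
    (PySem.Str.find s t ≠ -1) ↔ c ∈ s.toList := by
  rw [PySem.Str.find_ne_neg_one_iff, ht]
  exact List.singleton_infix_iff c s.toList

set_option maxHeartbeats 1000000 in
-- ===== VERDICT (by name: the statement is the Claim_ definition above) =====
theorem raisedpos_to_binary_spec : Claim_equal_raisedpos_to_binary := by
  intro s _
  unfold Spec_raisedpos_to_binary raisedpos_to_binary raisedpos_to_binary_alt
  rw [show PySem.List.pyRange 1 9 1 = [1, 2, 3, 4, 5, 6, 7, 8] from by decide]
  rw [fold_mark]
  simp only [List.foldl_cons, List.foldl_nil,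
    find_single_ne_neg_one s (PySem.Int.toStr 1) '1' (by decide),
    find_single_ne_neg_one s (PySem.Int.toStr 2) '2' (by decide),
    find_single_ne_neg_one s (PySem.Int.toStr 3) '3' (by decide),
    find_single_ne_neg_one s (PySem.Int.toStr 4) '4' (by decide),
    find_single_ne_neg_one s (PySem.Int.toStr 5) '5' (by decide),
    find_single_ne_neg_one s (PySem.Int.toStr 6) '6' (by decide),
    find_single_ne_neg_one s (PySem.Int.toStr 7) '7' (by decide),
    find_single_ne_neg_one s (PySem.Int.toStr 8) '8' (by decide)]
  split_ifs <;> rfl
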